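-- pv_equiv track=rewrite | github.com/0xouzm/feedgrab | scripts/release.py | categorize_commits
-- ===== SOURCE A (Python) =====
-- def categorize_commits(commits: list) -> dict:
--     """将 commit 按 conventional commit 类型分类。"""
--     categories = {
--         "新增": [],
--         "变更": [],
--         "修复": [],
--         "文档": [],
--         "其他": [],
--     }
--     for msg in commits:
--         lower = msg.lower()
--         if lower.startswith("feat"):
--             categories["新增"].append(msg)
--         elif lower.startswith("fix"):
--             categories["修复"].append(msg)
--         elif lower.startswith("docs"):
--             categories["文档"].append(msg)
--         elif lower.startswith(("refactor", "chore", "ci", "build")):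
--             categories["变更"].append(msg)
--         else:
--             categories["其他"].append(msg)
--     return {k: v for k, v in categories.items() if v}
-- ===== SOURCE B (Python) =====
-- _KEYS = ["新增", "变更", "修复", "文档", "其他"]
--
--
-- def _cat(msg):
--     lower = msg.lower()
--     if lower.startswith("feat"):
--         return "新增"
--     if lower.startswith("fix"):
--         return "修复"
--     if lower.startswith("docs"):
--         return "文档"
--     if lower.startswith(("refactor", "chore", "ci", "build")):
--         return "变更"
--     return "其他"
--
--
-- def categorize_commits(commits: list) -> dict:
--     """将 commit 按 conventional commit 类型分类。"""
--     # Staged passes: for each category (in output order) filter the commits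
--     # belonging to it; no mutable buckets, no per-commit dispatch loop.
--     result = {}
--     for key in _KEYS:
--         matched = [m for m in commits if _cat(m) == key]
--         if matched:
--             result[key] = matched
--     return result
-- ===== Notes on version B (the rewrite author's own statement) =====
-- stated objective: alternative
-- what changed: Replaces the single pass that dispatches each commit into one of five mutable buckets by staged per-category passes: for each category key in output order, a filter pass collects its commits, and empty categories are simply never inserted (no bucket dict, no final non-empty filter).
import Mathlib
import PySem

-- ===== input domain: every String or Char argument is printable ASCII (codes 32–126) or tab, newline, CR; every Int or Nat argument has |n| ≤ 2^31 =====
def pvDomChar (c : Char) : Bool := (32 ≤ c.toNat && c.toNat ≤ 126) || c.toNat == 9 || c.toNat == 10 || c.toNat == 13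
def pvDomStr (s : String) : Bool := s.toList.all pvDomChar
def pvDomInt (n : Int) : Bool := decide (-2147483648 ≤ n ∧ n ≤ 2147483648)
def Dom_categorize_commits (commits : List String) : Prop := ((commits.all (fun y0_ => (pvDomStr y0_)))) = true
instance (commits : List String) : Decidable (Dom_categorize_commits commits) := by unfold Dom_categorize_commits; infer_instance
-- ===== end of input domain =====

-- B replaces A's single pass dispatching each commit into one of five mutable buckets by
-- staged per-category filter passes that insert only non-empty categories; objective: alternative.

-- ===== PORT A =====
def categorize_commits (commits : List String) : List (String × List String) :=
  let categories : PySem.Dict String (List String) :=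
    PySem.Dict.ofList [("新增", []), ("变更", []), ("修复", []), ("文档", []), ("其他", [])]
  let final := commits.foldl (fun d msg =>
    let lower := PySem.Str.lower msg
    if PySem.Str.startswith lower "feat" then d.modify "新增" [] (· ++ [msg])
    else if PySem.Str.startswith lower "fix" then d.modify "修复" [] (· ++ [msg])
    else if PySem.Str.startswith lower "docs" then d.modify "文档" [] (· ++ [msg])
    else if PySem.Str.startswith lower "refactor" || PySem.Str.startswith lower "chore" ||
            PySem.Str.startswith lower "ci" || PySem.Str.startswith lower "build" then
      d.modify "变更" [] (· ++ [msg])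
    else d.modify "其他" [] (· ++ [msg])) categories
  final.items.filter (fun kv => !kv.2.isEmpty)

-- ===== PORT B =====
def pvKeys : List String := ["新增", "变更", "修复", "文档", "其他"]

def pvCat (msg : String) : String :=
  let lower := PySem.Str.lower msg
  if PySem.Str.startswith lower "feat" then "新增"
  else if PySem.Str.startswith lower "fix" then "修复"
  else if PySem.Str.startswith lower "docs" then "文档"
  else if PySem.Str.startswith lower "refactor" || PySem.Str.startswith lower "chore" ||
          PySem.Str.startswith lower "ci" || PySem.Str.startswith lower "build" then "变更"
  else "其他"

def categorize_commits_alt (commits : List String) : List (String × List String) :=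
  let result := pvKeys.foldl (fun r k =>
    let matched := commits.filter (fun m => pvCat m == k)
    if matched.isEmpty then r else r.insert k matched)
    (PySem.Dict.empty : PySem.Dict String (List String))
  result.items

-- ===== PRECONDITION & SPEC =====
def Spec_categorize_commits (commits : List String) (out : List (String × List String)) : Prop := out = categorize_commits_alt commits
instance (commits : List String) (out : List (String × List String)) : Decidable (Spec_categorize_commits commits out) := by unfold Spec_categorize_commits; infer_instance

-- ===== CLAIM (what is proved, stated in full; the proofs are below) =====
def Claim_equal_categorize_commits : Prop := ∀ (commits : List String), Dom_categorize_commits commits → Spec_categorize_commits commits (categorize_commits commits)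

-- ===== LEMMAS AND PROOFS =====

-- pvCat always yields one of the five category keys.
lemma pvCat_cases (msg : String) : pvCat msg = "新增" ∨ pvCat msg = "修复" ∨ pvCat msg = "文档" ∨ pvCat msg = "变更" ∨ pvCat msg = "其他" := by
  simp only [pvCat]; split_ifs <;> simp

-- A's per-commit if/elif step is exactly bucket dispatch on pvCat.
lemma step_eq (d : PySem.Dict String (List String)) (msg : String) :
    (let lower := PySem.Str.lower msg
     if PySem.Str.startswith lower "feat" then d.modify "新增" [] (· ++ [msg])
     else if PySem.Str.startswith lower "fix" then d.modify "修复" [] (· ++ [msg])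
     else if PySem.Str.startswith lower "docs" then d.modify "文档" [] (· ++ [msg])
     else if PySem.Str.startswith lower "refactor" || PySem.Str.startswith lower "chore" ||
             PySem.Str.startswith lower "ci" || PySem.Str.startswith lower "build" then
       d.modify "变更" [] (· ++ [msg])
     else d.modify "其他" [] (· ++ [msg])) =
    d.modify (pvCat msg) [] (· ++ [msg]) := by
  simp only [pvCat]
  split_ifs <;> rfl

-- A's whole fold, started from five named buckets, ends in the dict of per-key filtered lists.
lemma foldA_eq (commits : List String) (a b c d e : List String) :
    (commits.foldl (fun d msg => d.modify (pvCat msg) [] (· ++ [msg]))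
      (PySem.Dict.mk [("新增", a), ("变更", b), ("修复", c), ("文档", d), ("其他", e)])) =
    PySem.Dict.mk [("新增", a ++ commits.filter (fun m => pvCat m == "新增")),
                   ("变更", b ++ commits.filter (fun m => pvCat m == "变更")),
                   ("修复", c ++ commits.filter (fun m => pvCat m == "修复")),
                   ("文档", d ++ commits.filter (fun m => pvCat m == "文档")),
                   ("其他", e ++ commits.filter (fun m => pvCat m == "其他"))] := by
  induction commits generalizing a b c d e with
  | nil => simp
  | cons msg rest ih =>
    simp only [List.foldl_cons, List.filter_cons]
    have U : ∀ (k : String) (a b c d e : List String), k ∈ (["新增", "变更", "修复", "文档", "其他"] : List String) →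
        (PySem.Dict.mk [("新增", a), ("变更", b), ("修复", c), ("文档", d), ("其他", e)]).modify k [] (· ++ [msg]) =
        PySem.Dict.mk [("新增", if k = "新增" then a ++ [msg] else a),
                       ("变更", if k = "变更" then b ++ [msg] else b),
                       ("修复", if k = "修复" then c ++ [msg] else c),
                       ("文档", if k = "文档" then d ++ [msg] else d),
                       ("其他", if k = "其他" then e ++ [msg] else e)] := by
      intro k a b c d e hk
      fin_cases hk <;>
        simp [PySem.Dict.modify, PySem.Dict.insert, PySem.Dict.contains, PySem.Dict.getD, PySem.Dict.get?]
    rcases pvCat_cases msg with h|h|h|h|h <;> rw [h, U _ _ _ _ _ _ (by simp), ih] <;> simp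

-- ===== VERDICT (by name: the statement is the Claim_ definition above) =====
set_option maxHeartbeats 1000000 in
theorem categorize_commits_spec : Claim_equal_categorize_commits := by
  intro commits _
  unfold Spec_categorize_commits categorize_commits
  dsimp only
  rw [funext (fun d => funext (fun msg => step_eq d msg))]
  rw [show (PySem.Dict.ofList [("新增", ([] : List String)), ("变更", []), ("修复", []), ("文档", []), ("其他", [])]) =
      PySem.Dict.mk [("新增", []), ("变更", []), ("修复", []), ("文档", []), ("其他", [])] from rfl]
  rw [foldA_eq]
  simp only [categorize_commits_alt, pvKeys, List.foldl, List.nil_append]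
  split_ifs <;>
    simp [PySem.Dict.insert, PySem.Dict.empty, PySem.Dict.contains, List.filter, *]
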